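-- pv_equiv track=rewrite | github.com/chyang222/programmer_codingtest | level1/Kakao_Personality.py | solution
-- ===== SOURCE A (Python) =====
-- def solution(survey, choices):
--     check = {"R":0, "T":0, "C":0, "F":0, "J":0, "M":0, "A":0, "N":0}
--
--
--     for i in range(len(survey)):
--         if choices[i] == 1:
--             check[survey[i][0]] += 3
--         elif choices[i] == 2:
--             check[survey[i][0]] += 2
--         elif choices[i] == 3:
--             check[survey[i][0]] += 1
--         elif choices[i] == 5:
--             check[survey[i][1]] += 1
--         elif choices[i] == 6:
--             check[survey[i][1]] += 2
--         elif choices[i] == 7: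
--             check[survey[i][1]] += 3
--
--
--     result = ''
--
--     for i in range(0, len(check.items()), 2):
--         if list(check.values())[i] > list(check.values())[i+1]:
--             result += list(check.keys())[i]
--         elif list(check.values())[i] < list(check.values())[i+1]:
--             result += list(check.keys())[i+1]
--         else:
--             a = sorted(list(check.keys())[i] + list(check.keys())[i+1])
--             result += a[0]
--
--     return result
-- ===== SOURCE B (Python) =====
-- def solution(survey, choices):
--     axes = ["RT", "CF", "JM", "AN"]
--     side = {}
--     for axis in axes:
--         side[axis[0]] = (axis, 1)
--         side[axis[1]] = (axis, -1)
--     weight = {1: 3, 2: 2, 3: 1, 5: 1, 6: 2, 7: 3}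
--     balance = {axis: 0 for axis in axes}
--     for q, c in zip(survey, choices):
--         if c not in weight:
--             continue  # choice 4 (or anything else) moves nothing
--         letter = q[0] if c < 4 else q[1]
--         axis, sign = side[letter]
--         balance[axis] += sign * weight[c]
--     # first letter of each axis is the alphabetically smaller one, so ties fall to it
--     return ''.join(axis[0] if balance[axis] >= 0 else axis[1] for axis in axes)
-- ===== Notes on version B (the rewrite author's own statement) =====
-- stated objective: simpler
-- what changed: Replaces the eight-counter dict with a six-way elif chain and a second index loop that rebuilds the dict's key/value lists and sorts two letters per axis, by a single zip pass keeping one signed balance per axis driven by a letter->(axis,sign) table and a choice->weight table, then a direct join.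
import Mathlib
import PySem

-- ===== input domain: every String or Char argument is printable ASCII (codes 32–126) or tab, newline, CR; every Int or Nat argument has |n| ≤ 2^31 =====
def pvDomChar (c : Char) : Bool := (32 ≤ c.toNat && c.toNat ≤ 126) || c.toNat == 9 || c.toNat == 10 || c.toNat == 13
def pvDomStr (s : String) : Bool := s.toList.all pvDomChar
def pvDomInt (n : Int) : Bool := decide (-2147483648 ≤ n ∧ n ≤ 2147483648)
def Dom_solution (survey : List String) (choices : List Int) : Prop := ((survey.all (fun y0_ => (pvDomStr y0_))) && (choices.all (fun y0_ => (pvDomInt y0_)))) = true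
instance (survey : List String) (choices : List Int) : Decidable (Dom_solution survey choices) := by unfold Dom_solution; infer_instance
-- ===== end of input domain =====

-- B replaces A's eight-counter dict + second index loop (which rebuilds key/value lists
-- and sorts two letters per axis) by one signed balance per axis filled in a single zip
-- pass via lookup tables — simpler, same O(n) cost.

-- ===== PORT A =====
-- check[ch] += w  — a get followed by a set; a missing key is Python's KeyError,
-- a missing char is Python's IndexError on survey[i][_]: both outside Pre_solution,
-- the port leaves the dict unchanged there (totality guard only).
def incA (d : PySem.Dict Char Int) (o : Option Char) (w : Int) : PySem.Dict Char Int :=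
  match o with
  | none => d
  | some ch =>
    match d.get? ch with
    | none => d
    | some v => d.insert ch (v + w)

-- the if/elif chain of A's first loop (keys are the 1-char strings, ported as Char)
def stepA (d : PySem.Dict Char Int) (s : String) (c : Int) : PySem.Dict Char Int :=
  if c = 1 then incA d (PySem.Str.pyGet? s 0) 3
  else if c = 2 then incA d (PySem.Str.pyGet? s 0) 2
  else if c = 3 then incA d (PySem.Str.pyGet? s 0) 1
  else if c = 5 then incA d (PySem.Str.pyGet? s 1) 1
  else if c = 6 then incA d (PySem.Str.pyGet? s 1) 2
  else if c = 7 then incA d (PySem.Str.pyGet? s 1) 3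
  else d

-- A's second loop: for i in range(0, len(check.items()), 2) over values/keys lists
-- (the if/elif/else each append one character; ported as appending one conditional character)
def resultLoop (check : PySem.Dict Char Int) : String :=
  String.mk ((PySem.List.pyRange 0 (check.size : Int) 2).foldl (fun res i =>
    res ++ [if PySem.List.pyGetD check.values (i+1) 0 < PySem.List.pyGetD check.values i 0 then
      PySem.List.pyGetD check.keys i ' '
    else if PySem.List.pyGetD check.values i 0 < PySem.List.pyGetD check.values (i+1) 0 then
      PySem.List.pyGetD check.keys (i+1) ' '
    else
      let a := PySem.List.sorted [PySem.List.pyGetD check.keys i ' ',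
                                  PySem.List.pyGetD check.keys (i+1) ' '] (fun x => x) false
      PySem.List.pyGetD a 0 ' ']) [])

def solution (survey : List String) (choices : List Int) : String :=
  let check : PySem.Dict Char Int :=
    PySem.Dict.ofList [('R',0),('T',0),('C',0),('F',0),('J',0),('M',0),('A',0),('N',0)]
  let check := (PySem.List.pyRange 0 (survey.length : Int) 1).foldl
    (fun d i => stepA d (PySem.List.pyGetD survey i "") (PySem.List.pyGetD choices i 0)) check
  resultLoop check

-- ===== PORT B =====
def axesB : List String := ["RT", "CF", "JM", "AN"]

def sideB : PySem.Dict Char (String × Int) :=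
  axesB.foldl (fun d axis =>
    (d.insert ((PySem.Str.pyGet? axis 0).getD ' ') (axis, 1)).insert
      ((PySem.Str.pyGet? axis 1).getD ' ') (axis, -1)) PySem.Dict.empty

def weightB : PySem.Dict Int Int := PySem.Dict.ofList [(1,3),(2,2),(3,1),(5,1),(6,2),(7,3)]

-- body of B's zip loop; the `none` arms are Python's IndexError / KeyError
-- (outside Pre_solution), where the port leaves the balances unchanged.
def stepB (bal : PySem.Dict String Int) (q : String) (c : Int) : PySem.Dict String Int :=
  match weightB.get? c with
  | none => bal
  | some w =>
    match (if c < 4 then PySem.Str.pyGet? q 0 else PySem.Str.pyGet? q 1) with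
    | none => bal
    | some letter =>
      match sideB.get? letter with
      | none => bal
      | some p =>
        match bal.get? p.1 with
        | none => bal
        | some v => bal.insert p.1 (v + p.2 * w)

def solution_alt (survey : List String) (choices : List Int) : String :=
  let bal : PySem.Dict String Int := axesB.foldl (fun d axis => d.insert axis 0) PySem.Dict.empty
  let bal := (survey.zip choices).foldl (fun b p => stepB b p.1 p.2) bal
  PySem.Str.join "" (axesB.map (fun axis =>
    if 0 ≤ bal.getD axis 0 then String.mk [(PySem.Str.pyGet? axis 0).getD ' ']
    else String.mk [(PySem.Str.pyGet? axis 1).getD ' ']))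

-- ===== PRECONDITION & SPEC =====
def pvLetters : List Char := ['R','T','C','F','J','M','A','N']

def okChoice (s : String) (c : Int) : Bool :=
  if c = 1 ∨ c = 2 ∨ c = 3 then ((PySem.Str.pyGet? s 0).map pvLetters.contains).getD false
  else if c = 5 ∨ c = 6 ∨ c = 7 then ((PySem.Str.pyGet? s 1).map pvLetters.contains).getD false
  else true

-- Exactly the inputs where Python A returns: choices at least as long as survey
-- (else IndexError), and every question whose choice is in {1,2,3} (resp. {5,6,7})
-- has a first (resp. second) character that is one of the eight axis letters
-- (else IndexError / KeyError).
def Pre_solution (survey : List String) (choices : List Int) : Prop :=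
  survey.length ≤ choices.length ∧ ∀ p ∈ survey.zip choices, okChoice p.1 p.2 = true
instance (survey : List String) (choices : List Int) : Decidable (Pre_solution survey choices) := by
  unfold Pre_solution; infer_instance

def pvWitness_solution : List String × List Int := (["RT","CF","JM","AN"], [1, 5, 4, 7])

def Spec_solution (survey : List String) (choices : List Int) (out : String) : Prop := out = solution_alt survey choices
instance (survey : List String) (choices : List Int) (out : String) : Decidable (Spec_solution survey choices out) := by unfold Spec_solution; infer_instance

-- ===== CLAIM (what is proved, stated in full; the proofs are below) =====
def Claim_equal_solution : Prop := ∀ (survey : List String) (choices : List Int), Dom_solution survey choices → Pre_solution survey choices → Spec_solution survey choices (solution survey choices)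

-- ===== LEMMAS AND PROOFS =====

-- proof-only: the eight counters of A's dict as a pure record
structure Tally where
  r : Int
  t : Int
  c : Int
  f : Int
  j : Int
  m : Int
  a : Int
  n : Int
deriving DecidableEq, Repr

def mkD (x : Tally) : PySem.Dict Char Int :=
  PySem.Dict.mk [('R',x.r),('T',x.t),('C',x.c),('F',x.f),('J',x.j),('M',x.m),('A',x.a),('N',x.n)]

def mkB (x : Tally) : PySem.Dict String Int :=
  PySem.Dict.mk [("RT", x.r - x.t), ("CF", x.c - x.f), ("JM", x.j - x.m), ("AN", x.a - x.n)]

def pureInc (x : Tally) (o : Option Char) (w : Int) : Tally :=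
  match o with
  | none => x
  | some ch =>
    if ch = 'R' then { x with r := x.r + w }
    else if ch = 'T' then { x with t := x.t + w }
    else if ch = 'C' then { x with c := x.c + w }
    else if ch = 'F' then { x with f := x.f + w }
    else if ch = 'J' then { x with j := x.j + w }
    else if ch = 'M' then { x with m := x.m + w }
    else if ch = 'A' then { x with a := x.a + w }
    else if ch = 'N' then { x with n := x.n + w }
    else x

def pureStep (x : Tally) (s : String) (c : Int) : Tally :=
  if c = 1 then pureInc x (PySem.Str.pyGet? s 0) 3
  else if c = 2 then pureInc x (PySem.Str.pyGet? s 0) 2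
  else if c = 3 then pureInc x (PySem.Str.pyGet? s 0) 1
  else if c = 5 then pureInc x (PySem.Str.pyGet? s 1) 1
  else if c = 6 then pureInc x (PySem.Str.pyGet? s 1) 2
  else if c = 7 then pureInc x (PySem.Str.pyGet? s 1) 3
  else x

def pureLoop : List String → List Int → Tally → Tally
  | [], _, x => x
  | s :: sv, [], x => pureLoop sv [] (pureStep x s 0)
  | s :: sv, c :: cs, x => pureLoop sv cs (pureStep x s c)

theorem pureStep_zero (x : Tally) (s : String) : pureStep x s 0 = x := rfl

theorem pureLoop_nil : ∀ (sv : List String) (x : Tally), pureLoop sv [] x = x := by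
  intro sv; induction sv with
  | nil => intro x; rfl
  | cons s sv ih => intro x; simp [pureLoop, pureStep_zero, ih]

theorem incA_mk (x : Tally) (o : Option Char) (w : Int) :
    incA (mkD x) o w = mkD (pureInc x o w) := by
  cases o with
  | none => rfl
  | some ch =>
    by_cases h1 : ch = 'R'; · subst h1; rfl
    by_cases h2 : ch = 'T'; · subst h2; rfl
    by_cases h3 : ch = 'C'; · subst h3; rfl
    by_cases h4 : ch = 'F'; · subst h4; rfl
    by_cases h5 : ch = 'J'; · subst h5; rfl
    by_cases h6 : ch = 'M'; · subst h6; rfl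
    by_cases h7 : ch = 'A'; · subst h7; rfl
    by_cases h8 : ch = 'N'; · subst h8; rfl
    · have hg : (mkD x).get? ch = none := by
        simp only [mkD, PySem.Dict.get?_mk_cons, beq_iff_eq]
        rw [if_neg (fun hh => h1 hh.symm), if_neg (fun hh => h2 hh.symm),
            if_neg (fun hh => h3 hh.symm), if_neg (fun hh => h4 hh.symm),
            if_neg (fun hh => h5 hh.symm), if_neg (fun hh => h6 hh.symm),
            if_neg (fun hh => h7 hh.symm), if_neg (fun hh => h8 hh.symm)]
        rfl
      simp [incA, pureInc, hg, h1, h2, h3, h4, h5, h6, h7, h8]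

theorem stepA_mk (x : Tally) (s : String) (c : Int) :
    stepA (mkD x) s c = mkD (pureStep x s c) := by
  unfold stepA pureStep
  split_ifs <;> simp [incA_mk]

theorem stepB_mk (x : Tally) (s : String) (c : Int) :
    stepB (mkB x) s c = mkB (pureStep x s c) := by
  by_cases hc1 : c = 1
  · subst hc1
    cases hos : PySem.Str.pyGet? s 0 with
    | none =>
      unfold stepB
      rw [show weightB.get? (1:Int) = some 3 from rfl]
      rw [show (if (1:Int) < 4 then PySem.Str.pyGet? s 0 else PySem.Str.pyGet? s 1) = PySem.Str.pyGet? s 0 from rfl]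
      rw [hos]
      dsimp only
      rw [show pureStep x s 1 = pureInc x (PySem.Str.pyGet? s 0) 3 from rfl, hos]
      rfl
    | some ch =>
      unfold stepB
      rw [show weightB.get? (1:Int) = some 3 from rfl]
      rw [show (if (1:Int) < 4 then PySem.Str.pyGet? s 0 else PySem.Str.pyGet? s 1) = PySem.Str.pyGet? s 0 from rfl]
      rw [hos]
      dsimp only
      rw [show pureStep x s 1 = pureInc x (PySem.Str.pyGet? s 0) 3 from rfl, hos]
      by_cases h1 : ch = 'R'
      · subst h1
        rw [show sideB.get? 'R' = some ("RT", 1) from rfl]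
        dsimp only
        rw [show (mkB x).get? "RT" = some (x.r - x.t) from rfl]
        dsimp only
        rw [show pureInc x (some 'R') 3 = {x with r := x.r + 3} from rfl]
        apply PySem.Dict.ext
        show [("RT", x.r - x.t + 1 * 3), ("CF", x.c - x.f), ("JM", x.j - x.m), ("AN", x.a - x.n)] = [("RT", x.r + 3 - x.t), ("CF", x.c - x.f), ("JM", x.j - x.m), ("AN", x.a - x.n)]
        rw [show (x.r - x.t + 1 * 3 : Int) = x.r + 3 - x.t from by omega]
      · by_cases h2 : ch = 'T'
        · subst h2
          rw [show sideB.get? 'T' = some ("RT", -1) from rfl]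
          dsimp only
          rw [show (mkB x).get? "RT" = some (x.r - x.t) from rfl]
          dsimp only
          rw [show pureInc x (some 'T') 3 = {x with t := x.t + 3} from rfl]
          apply PySem.Dict.ext
          show [("RT", x.r - x.t + -1 * 3), ("CF", x.c - x.f), ("JM", x.j - x.m), ("AN", x.a - x.n)] = [("RT", x.r - (x.t + 3)), ("CF", x.c - x.f), ("JM", x.j - x.m), ("AN", x.a - x.n)]
          rw [show (x.r - x.t + -1 * 3 : Int) = x.r - (x.t + 3) from by omega]
        · by_cases h3 : ch = 'C'
          · subst h3
            rw [show sideB.get? 'C' = some ("CF", 1) from rfl]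
            dsimp only
            rw [show (mkB x).get? "CF" = some (x.c - x.f) from rfl]
            dsimp only
            rw [show pureInc x (some 'C') 3 = {x with c := x.c + 3} from rfl]
            apply PySem.Dict.ext
            show [("RT", x.r - x.t), ("CF", x.c - x.f + 1 * 3), ("JM", x.j - x.m), ("AN", x.a - x.n)] = [("RT", x.r - x.t), ("CF", x.c + 3 - x.f), ("JM", x.j - x.m), ("AN", x.a - x.n)]
            rw [show (x.c - x.f + 1 * 3 : Int) = x.c + 3 - x.f from by omega]
          · by_cases h4 : ch = 'F'
            · subst h4
              rw [show sideB.get? 'F' = some ("CF", -1) from rfl]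
              dsimp only
              rw [show (mkB x).get? "CF" = some (x.c - x.f) from rfl]
              dsimp only
              rw [show pureInc x (some 'F') 3 = {x with f := x.f + 3} from rfl]
              apply PySem.Dict.ext
              show [("RT", x.r - x.t), ("CF", x.c - x.f + -1 * 3), ("JM", x.j - x.m), ("AN", x.a - x.n)] = [("RT", x.r - x.t), ("CF", x.c - (x.f + 3)), ("JM", x.j - x.m), ("AN", x.a - x.n)]
              rw [show (x.c - x.f + -1 * 3 : Int) = x.c - (x.f + 3) from by omega]
            · by_cases h5 : ch = 'J'
              · subst h5
                rw [show sideB.get? 'J' = some ("JM", 1) from rfl]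
                dsimp only
                rw [show (mkB x).get? "JM" = some (x.j - x.m) from rfl]
                dsimp only
                rw [show pureInc x (some 'J') 3 = {x with j := x.j + 3} from rfl]
                apply PySem.Dict.ext
                show [("RT", x.r - x.t), ("CF", x.c - x.f), ("JM", x.j - x.m + 1 * 3), ("AN", x.a - x.n)] = [("RT", x.r - x.t), ("CF", x.c - x.f), ("JM", x.j + 3 - x.m), ("AN", x.a - x.n)]
                rw [show (x.j - x.m + 1 * 3 : Int) = x.j + 3 - x.m from by omega]
              · by_cases h6 : ch = 'M'
                · subst h6
                  rw [show sideB.get? 'M' = some ("JM", -1) from rfl]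
                  dsimp only
                  rw [show (mkB x).get? "JM" = some (x.j - x.m) from rfl]
                  dsimp only
                  rw [show pureInc x (some 'M') 3 = {x with m := x.m + 3} from rfl]
                  apply PySem.Dict.ext
                  show [("RT", x.r - x.t), ("CF", x.c - x.f), ("JM", x.j - x.m + -1 * 3), ("AN", x.a - x.n)] = [("RT", x.r - x.t), ("CF", x.c - x.f), ("JM", x.j - (x.m + 3)), ("AN", x.a - x.n)]
                  rw [show (x.j - x.m + -1 * 3 : Int) = x.j - (x.m + 3) from by omega]
                · by_cases h7 : ch = 'A'
                  · subst h7
                    rw [show sideB.get? 'A' = some ("AN", 1) from rfl]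
                    dsimp only
                    rw [show (mkB x).get? "AN" = some (x.a - x.n) from rfl]
                    dsimp only
                    rw [show pureInc x (some 'A') 3 = {x with a := x.a + 3} from rfl]
                    apply PySem.Dict.ext
                    show [("RT", x.r - x.t), ("CF", x.c - x.f), ("JM", x.j - x.m), ("AN", x.a - x.n + 1 * 3)] = [("RT", x.r - x.t), ("CF", x.c - x.f), ("JM", x.j - x.m), ("AN", x.a + 3 - x.n)]
                    rw [show (x.a - x.n + 1 * 3 : Int) = x.a + 3 - x.n from by omega]
                  · by_cases h8 : ch = 'N'
                    · subst h8
                      rw [show sideB.get? 'N' = some ("AN", -1) from rfl]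
                      dsimp only
                      rw [show (mkB x).get? "AN" = some (x.a - x.n) from rfl]
                      dsimp only
                      rw [show pureInc x (some 'N') 3 = {x with n := x.n + 3} from rfl]
                      apply PySem.Dict.ext
                      show [("RT", x.r - x.t), ("CF", x.c - x.f), ("JM", x.j - x.m), ("AN", x.a - x.n + -1 * 3)] = [("RT", x.r - x.t), ("CF", x.c - x.f), ("JM", x.j - x.m), ("AN", x.a - (x.n + 3))]
                      rw [show (x.a - x.n + -1 * 3 : Int) = x.a - (x.n + 3) from by omega]
                    · have hg : sideB.get? ch = none := by
                        rw [show sideB = PySem.Dict.mk [('R',(("RT":String),(1:Int))),('T',("RT",-1)),('C',("CF",1)),('F',("CF",-1)),('J',("JM",1)),('M',("JM",-1)),('A',("AN",1)),('N',("AN",-1))] from rfl]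
                        simp only [PySem.Dict.get?_mk_cons, beq_iff_eq]
                        rw [if_neg (fun hh => h1 hh.symm), if_neg (fun hh => h2 hh.symm), if_neg (fun hh => h3 hh.symm), if_neg (fun hh => h4 hh.symm), if_neg (fun hh => h5 hh.symm), if_neg (fun hh => h6 hh.symm), if_neg (fun hh => h7 hh.symm), if_neg (fun hh => h8 hh.symm)]
                        rfl
                      rw [hg]
                      dsimp only
                      unfold pureInc
                      dsimp only
                      rw [if_neg h1, if_neg h2, if_neg h3, if_neg h4, if_neg h5, if_neg h6, if_neg h7, if_neg h8]
  · by_cases hc2 : c = 2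
    · subst hc2
      cases hos : PySem.Str.pyGet? s 0 with
      | none =>
        unfold stepB
        rw [show weightB.get? (2:Int) = some 2 from rfl]
        rw [show (if (2:Int) < 4 then PySem.Str.pyGet? s 0 else PySem.Str.pyGet? s 1) = PySem.Str.pyGet? s 0 from rfl]
        rw [hos]
        dsimp only
        rw [show pureStep x s 2 = pureInc x (PySem.Str.pyGet? s 0) 2 from rfl, hos]
        rfl
      | some ch =>
        unfold stepB
        rw [show weightB.get? (2:Int) = some 2 from rfl]
        rw [show (if (2:Int) < 4 then PySem.Str.pyGet? s 0 else PySem.Str.pyGet? s 1) = PySem.Str.pyGet? s 0 from rfl]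
        rw [hos]
        dsimp only
        rw [show pureStep x s 2 = pureInc x (PySem.Str.pyGet? s 0) 2 from rfl, hos]
        by_cases h1 : ch = 'R'
        · subst h1
          rw [show sideB.get? 'R' = some ("RT", 1) from rfl]
          dsimp only
          rw [show (mkB x).get? "RT" = some (x.r - x.t) from rfl]
          dsimp only
          rw [show pureInc x (some 'R') 2 = {x with r := x.r + 2} from rfl]
          apply PySem.Dict.ext
          show [("RT", x.r - x.t + 1 * 2), ("CF", x.c - x.f), ("JM", x.j - x.m), ("AN", x.a - x.n)] = [("RT", x.r + 2 - x.t), ("CF", x.c - x.f), ("JM", x.j - x.m), ("AN", x.a - x.n)]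
          rw [show (x.r - x.t + 1 * 2 : Int) = x.r + 2 - x.t from by omega]
        · by_cases h2 : ch = 'T'
          · subst h2
            rw [show sideB.get? 'T' = some ("RT", -1) from rfl]
            dsimp only
            rw [show (mkB x).get? "RT" = some (x.r - x.t) from rfl]
            dsimp only
            rw [show pureInc x (some 'T') 2 = {x with t := x.t + 2} from rfl]
            apply PySem.Dict.ext
            show [("RT", x.r - x.t + -1 * 2), ("CF", x.c - x.f), ("JM", x.j - x.m), ("AN", x.a - x.n)] = [("RT", x.r - (x.t + 2)), ("CF", x.c - x.f), ("JM", x.j - x.m), ("AN", x.a - x.n)]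
            rw [show (x.r - x.t + -1 * 2 : Int) = x.r - (x.t + 2) from by omega]
          · by_cases h3 : ch = 'C'
            · subst h3
              rw [show sideB.get? 'C' = some ("CF", 1) from rfl]
              dsimp only
              rw [show (mkB x).get? "CF" = some (x.c - x.f) from rfl]
              dsimp only
              rw [show pureInc x (some 'C') 2 = {x with c := x.c + 2} from rfl]
              apply PySem.Dict.ext
              show [("RT", x.r - x.t), ("CF", x.c - x.f + 1 * 2), ("JM", x.j - x.m), ("AN", x.a - x.n)] = [("RT", x.r - x.t), ("CF", x.c + 2 - x.f), ("JM", x.j - x.m), ("AN", x.a - x.n)]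
              rw [show (x.c - x.f + 1 * 2 : Int) = x.c + 2 - x.f from by omega]
            · by_cases h4 : ch = 'F'
              · subst h4
                rw [show sideB.get? 'F' = some ("CF", -1) from rfl]
                dsimp only
                rw [show (mkB x).get? "CF" = some (x.c - x.f) from rfl]
                dsimp only
                rw [show pureInc x (some 'F') 2 = {x with f := x.f + 2} from rfl]
                apply PySem.Dict.ext
                show [("RT", x.r - x.t), ("CF", x.c - x.f + -1 * 2), ("JM", x.j - x.m), ("AN", x.a - x.n)] = [("RT", x.r - x.t), ("CF", x.c - (x.f + 2)), ("JM", x.j - x.m), ("AN", x.a - x.n)]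
                rw [show (x.c - x.f + -1 * 2 : Int) = x.c - (x.f + 2) from by omega]
              · by_cases h5 : ch = 'J'
                · subst h5
                  rw [show sideB.get? 'J' = some ("JM", 1) from rfl]
                  dsimp only
                  rw [show (mkB x).get? "JM" = some (x.j - x.m) from rfl]
                  dsimp only
                  rw [show pureInc x (some 'J') 2 = {x with j := x.j + 2} from rfl]
                  apply PySem.Dict.ext
                  show [("RT", x.r - x.t), ("CF", x.c - x.f), ("JM", x.j - x.m + 1 * 2), ("AN", x.a - x.n)] = [("RT", x.r - x.t), ("CF", x.c - x.f), ("JM", x.j + 2 - x.m), ("AN", x.a - x.n)]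
                  rw [show (x.j - x.m + 1 * 2 : Int) = x.j + 2 - x.m from by omega]
                · by_cases h6 : ch = 'M'
                  · subst h6
                    rw [show sideB.get? 'M' = some ("JM", -1) from rfl]
                    dsimp only
                    rw [show (mkB x).get? "JM" = some (x.j - x.m) from rfl]
                    dsimp only
                    rw [show pureInc x (some 'M') 2 = {x with m := x.m + 2} from rfl]
                    apply PySem.Dict.ext
                    show [("RT", x.r - x.t), ("CF", x.c - x.f), ("JM", x.j - x.m + -1 * 2), ("AN", x.a - x.n)] = [("RT", x.r - x.t), ("CF", x.c - x.f), ("JM", x.j - (x.m + 2)), ("AN", x.a - x.n)]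
                    rw [show (x.j - x.m + -1 * 2 : Int) = x.j - (x.m + 2) from by omega]
                  · by_cases h7 : ch = 'A'
                    · subst h7
                      rw [show sideB.get? 'A' = some ("AN", 1) from rfl]
                      dsimp only
                      rw [show (mkB x).get? "AN" = some (x.a - x.n) from rfl]
                      dsimp only
                      rw [show pureInc x (some 'A') 2 = {x with a := x.a + 2} from rfl]
                      apply PySem.Dict.ext
                      show [("RT", x.r - x.t), ("CF", x.c - x.f), ("JM", x.j - x.m), ("AN", x.a - x.n + 1 * 2)] = [("RT", x.r - x.t), ("CF", x.c - x.f), ("JM", x.j - x.m), ("AN", x.a + 2 - x.n)]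
                      rw [show (x.a - x.n + 1 * 2 : Int) = x.a + 2 - x.n from by omega]
                    · by_cases h8 : ch = 'N'
                      · subst h8
                        rw [show sideB.get? 'N' = some ("AN", -1) from rfl]
                        dsimp only
                        rw [show (mkB x).get? "AN" = some (x.a - x.n) from rfl]
                        dsimp only
                        rw [show pureInc x (some 'N') 2 = {x with n := x.n + 2} from rfl]
                        apply PySem.Dict.ext
                        show [("RT", x.r - x.t), ("CF", x.c - x.f), ("JM", x.j - x.m), ("AN", x.a - x.n + -1 * 2)] = [("RT", x.r - x.t), ("CF", x.c - x.f), ("JM", x.j - x.m), ("AN", x.a - (x.n + 2))]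
                        rw [show (x.a - x.n + -1 * 2 : Int) = x.a - (x.n + 2) from by omega]
                      · have hg : sideB.get? ch = none := by
                          rw [show sideB = PySem.Dict.mk [('R',(("RT":String),(1:Int))),('T',("RT",-1)),('C',("CF",1)),('F',("CF",-1)),('J',("JM",1)),('M',("JM",-1)),('A',("AN",1)),('N',("AN",-1))] from rfl]
                          simp only [PySem.Dict.get?_mk_cons, beq_iff_eq]
                          rw [if_neg (fun hh => h1 hh.symm), if_neg (fun hh => h2 hh.symm), if_neg (fun hh => h3 hh.symm), if_neg (fun hh => h4 hh.symm), if_neg (fun hh => h5 hh.symm), if_neg (fun hh => h6 hh.symm), if_neg (fun hh => h7 hh.symm), if_neg (fun hh => h8 hh.symm)]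
                          rfl
                        rw [hg]
                        dsimp only
                        unfold pureInc
                        dsimp only
                        rw [if_neg h1, if_neg h2, if_neg h3, if_neg h4, if_neg h5, if_neg h6, if_neg h7, if_neg h8]
    · by_cases hc3 : c = 3
      · subst hc3
        cases hos : PySem.Str.pyGet? s 0 with
        | none =>
          unfold stepB
          rw [show weightB.get? (3:Int) = some 1 from rfl]
          rw [show (if (3:Int) < 4 then PySem.Str.pyGet? s 0 else PySem.Str.pyGet? s 1) = PySem.Str.pyGet? s 0 from rfl]
          rw [hos]
          dsimp only
          rw [show pureStep x s 3 = pureInc x (PySem.Str.pyGet? s 0) 1 from rfl, hos]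
          rfl
        | some ch =>
          unfold stepB
          rw [show weightB.get? (3:Int) = some 1 from rfl]
          rw [show (if (3:Int) < 4 then PySem.Str.pyGet? s 0 else PySem.Str.pyGet? s 1) = PySem.Str.pyGet? s 0 from rfl]
          rw [hos]
          dsimp only
          rw [show pureStep x s 3 = pureInc x (PySem.Str.pyGet? s 0) 1 from rfl, hos]
          by_cases h1 : ch = 'R'
          · subst h1
            rw [show sideB.get? 'R' = some ("RT", 1) from rfl]
            dsimp only
            rw [show (mkB x).get? "RT" = some (x.r - x.t) from rfl]
            dsimp only
            rw [show pureInc x (some 'R') 1 = {x with r := x.r + 1} from rfl]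
            apply PySem.Dict.ext
            show [("RT", x.r - x.t + 1 * 1), ("CF", x.c - x.f), ("JM", x.j - x.m), ("AN", x.a - x.n)] = [("RT", x.r + 1 - x.t), ("CF", x.c - x.f), ("JM", x.j - x.m), ("AN", x.a - x.n)]
            rw [show (x.r - x.t + 1 * 1 : Int) = x.r + 1 - x.t from by omega]
          · by_cases h2 : ch = 'T'
            · subst h2
              rw [show sideB.get? 'T' = some ("RT", -1) from rfl]
              dsimp only
              rw [show (mkB x).get? "RT" = some (x.r - x.t) from rfl]
              dsimp only
              rw [show pureInc x (some 'T') 1 = {x with t := x.t + 1} from rfl]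
              apply PySem.Dict.ext
              show [("RT", x.r - x.t + -1 * 1), ("CF", x.c - x.f), ("JM", x.j - x.m), ("AN", x.a - x.n)] = [("RT", x.r - (x.t + 1)), ("CF", x.c - x.f), ("JM", x.j - x.m), ("AN", x.a - x.n)]
              rw [show (x.r - x.t + -1 * 1 : Int) = x.r - (x.t + 1) from by omega]
            · by_cases h3 : ch = 'C'
              · subst h3
                rw [show sideB.get? 'C' = some ("CF", 1) from rfl]
                dsimp only
                rw [show (mkB x).get? "CF" = some (x.c - x.f) from rfl]
                dsimp only
                rw [show pureInc x (some 'C') 1 = {x with c := x.c + 1} from rfl]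
                apply PySem.Dict.ext
                show [("RT", x.r - x.t), ("CF", x.c - x.f + 1 * 1), ("JM", x.j - x.m), ("AN", x.a - x.n)] = [("RT", x.r - x.t), ("CF", x.c + 1 - x.f), ("JM", x.j - x.m), ("AN", x.a - x.n)]
                rw [show (x.c - x.f + 1 * 1 : Int) = x.c + 1 - x.f from by omega]
              · by_cases h4 : ch = 'F'
                · subst h4
                  rw [show sideB.get? 'F' = some ("CF", -1) from rfl]
                  dsimp only
                  rw [show (mkB x).get? "CF" = some (x.c - x.f) from rfl]
                  dsimp only
                  rw [show pureInc x (some 'F') 1 = {x with f := x.f + 1} from rfl]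
                  apply PySem.Dict.ext
                  show [("RT", x.r - x.t), ("CF", x.c - x.f + -1 * 1), ("JM", x.j - x.m), ("AN", x.a - x.n)] = [("RT", x.r - x.t), ("CF", x.c - (x.f + 1)), ("JM", x.j - x.m), ("AN", x.a - x.n)]
                  rw [show (x.c - x.f + -1 * 1 : Int) = x.c - (x.f + 1) from by omega]
                · by_cases h5 : ch = 'J'
                  · subst h5
                    rw [show sideB.get? 'J' = some ("JM", 1) from rfl]
                    dsimp only
                    rw [show (mkB x).get? "JM" = some (x.j - x.m) from rfl]
                    dsimp only
                    rw [show pureInc x (some 'J') 1 = {x with j := x.j + 1} from rfl]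
                    apply PySem.Dict.ext
                    show [("RT", x.r - x.t), ("CF", x.c - x.f), ("JM", x.j - x.m + 1 * 1), ("AN", x.a - x.n)] = [("RT", x.r - x.t), ("CF", x.c - x.f), ("JM", x.j + 1 - x.m), ("AN", x.a - x.n)]
                    rw [show (x.j - x.m + 1 * 1 : Int) = x.j + 1 - x.m from by omega]
                  · by_cases h6 : ch = 'M'
                    · subst h6
                      rw [show sideB.get? 'M' = some ("JM", -1) from rfl]
                      dsimp only
                      rw [show (mkB x).get? "JM" = some (x.j - x.m) from rfl]
                      dsimp only
                      rw [show pureInc x (some 'M') 1 = {x with m := x.m + 1} from rfl]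
                      apply PySem.Dict.ext
                      show [("RT", x.r - x.t), ("CF", x.c - x.f), ("JM", x.j - x.m + -1 * 1), ("AN", x.a - x.n)] = [("RT", x.r - x.t), ("CF", x.c - x.f), ("JM", x.j - (x.m + 1)), ("AN", x.a - x.n)]
                      rw [show (x.j - x.m + -1 * 1 : Int) = x.j - (x.m + 1) from by omega]
                    · by_cases h7 : ch = 'A'
                      · subst h7
                        rw [show sideB.get? 'A' = some ("AN", 1) from rfl]
                        dsimp only
                        rw [show (mkB x).get? "AN" = some (x.a - x.n) from rfl]
                        dsimp only
                        rw [show pureInc x (some 'A') 1 = {x with a := x.a + 1} from rfl]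
                        apply PySem.Dict.ext
                        show [("RT", x.r - x.t), ("CF", x.c - x.f), ("JM", x.j - x.m), ("AN", x.a - x.n + 1 * 1)] = [("RT", x.r - x.t), ("CF", x.c - x.f), ("JM", x.j - x.m), ("AN", x.a + 1 - x.n)]
                        rw [show (x.a - x.n + 1 * 1 : Int) = x.a + 1 - x.n from by omega]
                      · by_cases h8 : ch = 'N'
                        · subst h8
                          rw [show sideB.get? 'N' = some ("AN", -1) from rfl]
                          dsimp only
                          rw [show (mkB x).get? "AN" = some (x.a - x.n) from rfl]
                          dsimp only
                          rw [show pureInc x (some 'N') 1 = {x with n := x.n + 1} from rfl]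
                          apply PySem.Dict.ext
                          show [("RT", x.r - x.t), ("CF", x.c - x.f), ("JM", x.j - x.m), ("AN", x.a - x.n + -1 * 1)] = [("RT", x.r - x.t), ("CF", x.c - x.f), ("JM", x.j - x.m), ("AN", x.a - (x.n + 1))]
                          rw [show (x.a - x.n + -1 * 1 : Int) = x.a - (x.n + 1) from by omega]
                        · have hg : sideB.get? ch = none := by
                            rw [show sideB = PySem.Dict.mk [('R',(("RT":String),(1:Int))),('T',("RT",-1)),('C',("CF",1)),('F',("CF",-1)),('J',("JM",1)),('M',("JM",-1)),('A',("AN",1)),('N',("AN",-1))] from rfl]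
                            simp only [PySem.Dict.get?_mk_cons, beq_iff_eq]
                            rw [if_neg (fun hh => h1 hh.symm), if_neg (fun hh => h2 hh.symm), if_neg (fun hh => h3 hh.symm), if_neg (fun hh => h4 hh.symm), if_neg (fun hh => h5 hh.symm), if_neg (fun hh => h6 hh.symm), if_neg (fun hh => h7 hh.symm), if_neg (fun hh => h8 hh.symm)]
                            rfl
                          rw [hg]
                          dsimp only
                          unfold pureInc
                          dsimp only
                          rw [if_neg h1, if_neg h2, if_neg h3, if_neg h4, if_neg h5, if_neg h6, if_neg h7, if_neg h8]
      · by_cases hc5 : c = 5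
        · subst hc5
          cases hos : PySem.Str.pyGet? s 1 with
          | none =>
            unfold stepB
            rw [show weightB.get? (5:Int) = some 1 from rfl]
            rw [show (if (5:Int) < 4 then PySem.Str.pyGet? s 0 else PySem.Str.pyGet? s 1) = PySem.Str.pyGet? s 1 from rfl]
            rw [hos]
            dsimp only
            rw [show pureStep x s 5 = pureInc x (PySem.Str.pyGet? s 1) 1 from rfl, hos]
            rfl
          | some ch =>
            unfold stepB
            rw [show weightB.get? (5:Int) = some 1 from rfl]
            rw [show (if (5:Int) < 4 then PySem.Str.pyGet? s 0 else PySem.Str.pyGet? s 1) = PySem.Str.pyGet? s 1 from rfl]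
            rw [hos]
            dsimp only
            rw [show pureStep x s 5 = pureInc x (PySem.Str.pyGet? s 1) 1 from rfl, hos]
            by_cases h1 : ch = 'R'
            · subst h1
              rw [show sideB.get? 'R' = some ("RT", 1) from rfl]
              dsimp only
              rw [show (mkB x).get? "RT" = some (x.r - x.t) from rfl]
              dsimp only
              rw [show pureInc x (some 'R') 1 = {x with r := x.r + 1} from rfl]
              apply PySem.Dict.ext
              show [("RT", x.r - x.t + 1 * 1), ("CF", x.c - x.f), ("JM", x.j - x.m), ("AN", x.a - x.n)] = [("RT", x.r + 1 - x.t), ("CF", x.c - x.f), ("JM", x.j - x.m), ("AN", x.a - x.n)]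
              rw [show (x.r - x.t + 1 * 1 : Int) = x.r + 1 - x.t from by omega]
            · by_cases h2 : ch = 'T'
              · subst h2
                rw [show sideB.get? 'T' = some ("RT", -1) from rfl]
                dsimp only
                rw [show (mkB x).get? "RT" = some (x.r - x.t) from rfl]
                dsimp only
                rw [show pureInc x (some 'T') 1 = {x with t := x.t + 1} from rfl]
                apply PySem.Dict.ext
                show [("RT", x.r - x.t + -1 * 1), ("CF", x.c - x.f), ("JM", x.j - x.m), ("AN", x.a - x.n)] = [("RT", x.r - (x.t + 1)), ("CF", x.c - x.f), ("JM", x.j - x.m), ("AN", x.a - x.n)]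
                rw [show (x.r - x.t + -1 * 1 : Int) = x.r - (x.t + 1) from by omega]
              · by_cases h3 : ch = 'C'
                · subst h3
                  rw [show sideB.get? 'C' = some ("CF", 1) from rfl]
                  dsimp only
                  rw [show (mkB x).get? "CF" = some (x.c - x.f) from rfl]
                  dsimp only
                  rw [show pureInc x (some 'C') 1 = {x with c := x.c + 1} from rfl]
                  apply PySem.Dict.ext
                  show [("RT", x.r - x.t), ("CF", x.c - x.f + 1 * 1), ("JM", x.j - x.m), ("AN", x.a - x.n)] = [("RT", x.r - x.t), ("CF", x.c + 1 - x.f), ("JM", x.j - x.m), ("AN", x.a - x.n)]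
                  rw [show (x.c - x.f + 1 * 1 : Int) = x.c + 1 - x.f from by omega]
                · by_cases h4 : ch = 'F'
                  · subst h4
                    rw [show sideB.get? 'F' = some ("CF", -1) from rfl]
                    dsimp only
                    rw [show (mkB x).get? "CF" = some (x.c - x.f) from rfl]
                    dsimp only
                    rw [show pureInc x (some 'F') 1 = {x with f := x.f + 1} from rfl]
                    apply PySem.Dict.ext
                    show [("RT", x.r - x.t), ("CF", x.c - x.f + -1 * 1), ("JM", x.j - x.m), ("AN", x.a - x.n)] = [("RT", x.r - x.t), ("CF", x.c - (x.f + 1)), ("JM", x.j - x.m), ("AN", x.a - x.n)]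
                    rw [show (x.c - x.f + -1 * 1 : Int) = x.c - (x.f + 1) from by omega]
                  · by_cases h5 : ch = 'J'
                    · subst h5
                      rw [show sideB.get? 'J' = some ("JM", 1) from rfl]
                      dsimp only
                      rw [show (mkB x).get? "JM" = some (x.j - x.m) from rfl]
                      dsimp only
                      rw [show pureInc x (some 'J') 1 = {x with j := x.j + 1} from rfl]
                      apply PySem.Dict.ext
                      show [("RT", x.r - x.t), ("CF", x.c - x.f), ("JM", x.j - x.m + 1 * 1), ("AN", x.a - x.n)] = [("RT", x.r - x.t), ("CF", x.c - x.f), ("JM", x.j + 1 - x.m), ("AN", x.a - x.n)]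
                      rw [show (x.j - x.m + 1 * 1 : Int) = x.j + 1 - x.m from by omega]
                    · by_cases h6 : ch = 'M'
                      · subst h6
                        rw [show sideB.get? 'M' = some ("JM", -1) from rfl]
                        dsimp only
                        rw [show (mkB x).get? "JM" = some (x.j - x.m) from rfl]
                        dsimp only
                        rw [show pureInc x (some 'M') 1 = {x with m := x.m + 1} from rfl]
                        apply PySem.Dict.ext
                        show [("RT", x.r - x.t), ("CF", x.c - x.f), ("JM", x.j - x.m + -1 * 1), ("AN", x.a - x.n)] = [("RT", x.r - x.t), ("CF", x.c - x.f), ("JM", x.j - (x.m + 1)), ("AN", x.a - x.n)]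
                        rw [show (x.j - x.m + -1 * 1 : Int) = x.j - (x.m + 1) from by omega]
                      · by_cases h7 : ch = 'A'
                        · subst h7
                          rw [show sideB.get? 'A' = some ("AN", 1) from rfl]
                          dsimp only
                          rw [show (mkB x).get? "AN" = some (x.a - x.n) from rfl]
                          dsimp only
                          rw [show pureInc x (some 'A') 1 = {x with a := x.a + 1} from rfl]
                          apply PySem.Dict.ext
                          show [("RT", x.r - x.t), ("CF", x.c - x.f), ("JM", x.j - x.m), ("AN", x.a - x.n + 1 * 1)] = [("RT", x.r - x.t), ("CF", x.c - x.f), ("JM", x.j - x.m), ("AN", x.a + 1 - x.n)]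
                          rw [show (x.a - x.n + 1 * 1 : Int) = x.a + 1 - x.n from by omega]
                        · by_cases h8 : ch = 'N'
                          · subst h8
                            rw [show sideB.get? 'N' = some ("AN", -1) from rfl]
                            dsimp only
                            rw [show (mkB x).get? "AN" = some (x.a - x.n) from rfl]
                            dsimp only
                            rw [show pureInc x (some 'N') 1 = {x with n := x.n + 1} from rfl]
                            apply PySem.Dict.ext
                            show [("RT", x.r - x.t), ("CF", x.c - x.f), ("JM", x.j - x.m), ("AN", x.a - x.n + -1 * 1)] = [("RT", x.r - x.t), ("CF", x.c - x.f), ("JM", x.j - x.m), ("AN", x.a - (x.n + 1))]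
                            rw [show (x.a - x.n + -1 * 1 : Int) = x.a - (x.n + 1) from by omega]
                          · have hg : sideB.get? ch = none := by
                              rw [show sideB = PySem.Dict.mk [('R',(("RT":String),(1:Int))),('T',("RT",-1)),('C',("CF",1)),('F',("CF",-1)),('J',("JM",1)),('M',("JM",-1)),('A',("AN",1)),('N',("AN",-1))] from rfl]
                              simp only [PySem.Dict.get?_mk_cons, beq_iff_eq]
                              rw [if_neg (fun hh => h1 hh.symm), if_neg (fun hh => h2 hh.symm), if_neg (fun hh => h3 hh.symm), if_neg (fun hh => h4 hh.symm), if_neg (fun hh => h5 hh.symm), if_neg (fun hh => h6 hh.symm), if_neg (fun hh => h7 hh.symm), if_neg (fun hh => h8 hh.symm)]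
                              rfl
                            rw [hg]
                            dsimp only
                            unfold pureInc
                            dsimp only
                            rw [if_neg h1, if_neg h2, if_neg h3, if_neg h4, if_neg h5, if_neg h6, if_neg h7, if_neg h8]
        · by_cases hc6 : c = 6
          · subst hc6
            cases hos : PySem.Str.pyGet? s 1 with
            | none =>
              unfold stepB
              rw [show weightB.get? (6:Int) = some 2 from rfl]
              rw [show (if (6:Int) < 4 then PySem.Str.pyGet? s 0 else PySem.Str.pyGet? s 1) = PySem.Str.pyGet? s 1 from rfl]
              rw [hos]
              dsimp only
              rw [show pureStep x s 6 = pureInc x (PySem.Str.pyGet? s 1) 2 from rfl, hos]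
              rfl
            | some ch =>
              unfold stepB
              rw [show weightB.get? (6:Int) = some 2 from rfl]
              rw [show (if (6:Int) < 4 then PySem.Str.pyGet? s 0 else PySem.Str.pyGet? s 1) = PySem.Str.pyGet? s 1 from rfl]
              rw [hos]
              dsimp only
              rw [show pureStep x s 6 = pureInc x (PySem.Str.pyGet? s 1) 2 from rfl, hos]
              by_cases h1 : ch = 'R'
              · subst h1
                rw [show sideB.get? 'R' = some ("RT", 1) from rfl]
                dsimp only
                rw [show (mkB x).get? "RT" = some (x.r - x.t) from rfl]
                dsimp only
                rw [show pureInc x (some 'R') 2 = {x with r := x.r + 2} from rfl]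
                apply PySem.Dict.ext
                show [("RT", x.r - x.t + 1 * 2), ("CF", x.c - x.f), ("JM", x.j - x.m), ("AN", x.a - x.n)] = [("RT", x.r + 2 - x.t), ("CF", x.c - x.f), ("JM", x.j - x.m), ("AN", x.a - x.n)]
                rw [show (x.r - x.t + 1 * 2 : Int) = x.r + 2 - x.t from by omega]
              · by_cases h2 : ch = 'T'
                · subst h2
                  rw [show sideB.get? 'T' = some ("RT", -1) from rfl]
                  dsimp only
                  rw [show (mkB x).get? "RT" = some (x.r - x.t) from rfl]
                  dsimp only
                  rw [show pureInc x (some 'T') 2 = {x with t := x.t + 2} from rfl]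
                  apply PySem.Dict.ext
                  show [("RT", x.r - x.t + -1 * 2), ("CF", x.c - x.f), ("JM", x.j - x.m), ("AN", x.a - x.n)] = [("RT", x.r - (x.t + 2)), ("CF", x.c - x.f), ("JM", x.j - x.m), ("AN", x.a - x.n)]
                  rw [show (x.r - x.t + -1 * 2 : Int) = x.r - (x.t + 2) from by omega]
                · by_cases h3 : ch = 'C'
                  · subst h3
                    rw [show sideB.get? 'C' = some ("CF", 1) from rfl]
                    dsimp only
                    rw [show (mkB x).get? "CF" = some (x.c - x.f) from rfl]
                    dsimp only
                    rw [show pureInc x (some 'C') 2 = {x with c := x.c + 2} from rfl]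
                    apply PySem.Dict.ext
                    show [("RT", x.r - x.t), ("CF", x.c - x.f + 1 * 2), ("JM", x.j - x.m), ("AN", x.a - x.n)] = [("RT", x.r - x.t), ("CF", x.c + 2 - x.f), ("JM", x.j - x.m), ("AN", x.a - x.n)]
                    rw [show (x.c - x.f + 1 * 2 : Int) = x.c + 2 - x.f from by omega]
                  · by_cases h4 : ch = 'F'
                    · subst h4
                      rw [show sideB.get? 'F' = some ("CF", -1) from rfl]
                      dsimp only
                      rw [show (mkB x).get? "CF" = some (x.c - x.f) from rfl]
                      dsimp only
                      rw [show pureInc x (some 'F') 2 = {x with f := x.f + 2} from rfl]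
                      apply PySem.Dict.ext
                      show [("RT", x.r - x.t), ("CF", x.c - x.f + -1 * 2), ("JM", x.j - x.m), ("AN", x.a - x.n)] = [("RT", x.r - x.t), ("CF", x.c - (x.f + 2)), ("JM", x.j - x.m), ("AN", x.a - x.n)]
                      rw [show (x.c - x.f + -1 * 2 : Int) = x.c - (x.f + 2) from by omega]
                    · by_cases h5 : ch = 'J'
                      · subst h5
                        rw [show sideB.get? 'J' = some ("JM", 1) from rfl]
                        dsimp only
                        rw [show (mkB x).get? "JM" = some (x.j - x.m) from rfl]
                        dsimp only
                        rw [show pureInc x (some 'J') 2 = {x with j := x.j + 2} from rfl]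
                        apply PySem.Dict.ext
                        show [("RT", x.r - x.t), ("CF", x.c - x.f), ("JM", x.j - x.m + 1 * 2), ("AN", x.a - x.n)] = [("RT", x.r - x.t), ("CF", x.c - x.f), ("JM", x.j + 2 - x.m), ("AN", x.a - x.n)]
                        rw [show (x.j - x.m + 1 * 2 : Int) = x.j + 2 - x.m from by omega]
                      · by_cases h6 : ch = 'M'
                        · subst h6
                          rw [show sideB.get? 'M' = some ("JM", -1) from rfl]
                          dsimp only
                          rw [show (mkB x).get? "JM" = some (x.j - x.m) from rfl]
                          dsimp only
                          rw [show pureInc x (some 'M') 2 = {x with m := x.m + 2} from rfl]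
                          apply PySem.Dict.ext
                          show [("RT", x.r - x.t), ("CF", x.c - x.f), ("JM", x.j - x.m + -1 * 2), ("AN", x.a - x.n)] = [("RT", x.r - x.t), ("CF", x.c - x.f), ("JM", x.j - (x.m + 2)), ("AN", x.a - x.n)]
                          rw [show (x.j - x.m + -1 * 2 : Int) = x.j - (x.m + 2) from by omega]
                        · by_cases h7 : ch = 'A'
                          · subst h7
                            rw [show sideB.get? 'A' = some ("AN", 1) from rfl]
                            dsimp only
                            rw [show (mkB x).get? "AN" = some (x.a - x.n) from rfl]
                            dsimp only
                            rw [show pureInc x (some 'A') 2 = {x with a := x.a + 2} from rfl]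
                            apply PySem.Dict.ext
                            show [("RT", x.r - x.t), ("CF", x.c - x.f), ("JM", x.j - x.m), ("AN", x.a - x.n + 1 * 2)] = [("RT", x.r - x.t), ("CF", x.c - x.f), ("JM", x.j - x.m), ("AN", x.a + 2 - x.n)]
                            rw [show (x.a - x.n + 1 * 2 : Int) = x.a + 2 - x.n from by omega]
                          · by_cases h8 : ch = 'N'
                            · subst h8
                              rw [show sideB.get? 'N' = some ("AN", -1) from rfl]
                              dsimp only
                              rw [show (mkB x).get? "AN" = some (x.a - x.n) from rfl]
                              dsimp only
                              rw [show pureInc x (some 'N') 2 = {x with n := x.n + 2} from rfl]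
                              apply PySem.Dict.ext
                              show [("RT", x.r - x.t), ("CF", x.c - x.f), ("JM", x.j - x.m), ("AN", x.a - x.n + -1 * 2)] = [("RT", x.r - x.t), ("CF", x.c - x.f), ("JM", x.j - x.m), ("AN", x.a - (x.n + 2))]
                              rw [show (x.a - x.n + -1 * 2 : Int) = x.a - (x.n + 2) from by omega]
                            · have hg : sideB.get? ch = none := by
                                rw [show sideB = PySem.Dict.mk [('R',(("RT":String),(1:Int))),('T',("RT",-1)),('C',("CF",1)),('F',("CF",-1)),('J',("JM",1)),('M',("JM",-1)),('A',("AN",1)),('N',("AN",-1))] from rfl]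
                                simp only [PySem.Dict.get?_mk_cons, beq_iff_eq]
                                rw [if_neg (fun hh => h1 hh.symm), if_neg (fun hh => h2 hh.symm), if_neg (fun hh => h3 hh.symm), if_neg (fun hh => h4 hh.symm), if_neg (fun hh => h5 hh.symm), if_neg (fun hh => h6 hh.symm), if_neg (fun hh => h7 hh.symm), if_neg (fun hh => h8 hh.symm)]
                                rfl
                              rw [hg]
                              dsimp only
                              unfold pureInc
                              dsimp only
                              rw [if_neg h1, if_neg h2, if_neg h3, if_neg h4, if_neg h5, if_neg h6, if_neg h7, if_neg h8]
          · by_cases hc7 : c = 7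
            · subst hc7
              cases hos : PySem.Str.pyGet? s 1 with
              | none =>
                unfold stepB
                rw [show weightB.get? (7:Int) = some 3 from rfl]
                rw [show (if (7:Int) < 4 then PySem.Str.pyGet? s 0 else PySem.Str.pyGet? s 1) = PySem.Str.pyGet? s 1 from rfl]
                rw [hos]
                dsimp only
                rw [show pureStep x s 7 = pureInc x (PySem.Str.pyGet? s 1) 3 from rfl, hos]
                rfl
              | some ch =>
                unfold stepB
                rw [show weightB.get? (7:Int) = some 3 from rfl]
                rw [show (if (7:Int) < 4 then PySem.Str.pyGet? s 0 else PySem.Str.pyGet? s 1) = PySem.Str.pyGet? s 1 from rfl]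
                rw [hos]
                dsimp only
                rw [show pureStep x s 7 = pureInc x (PySem.Str.pyGet? s 1) 3 from rfl, hos]
                by_cases h1 : ch = 'R'
                · subst h1
                  rw [show sideB.get? 'R' = some ("RT", 1) from rfl]
                  dsimp only
                  rw [show (mkB x).get? "RT" = some (x.r - x.t) from rfl]
                  dsimp only
                  rw [show pureInc x (some 'R') 3 = {x with r := x.r + 3} from rfl]
                  apply PySem.Dict.ext
                  show [("RT", x.r - x.t + 1 * 3), ("CF", x.c - x.f), ("JM", x.j - x.m), ("AN", x.a - x.n)] = [("RT", x.r + 3 - x.t), ("CF", x.c - x.f), ("JM", x.j - x.m), ("AN", x.a - x.n)]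
                  rw [show (x.r - x.t + 1 * 3 : Int) = x.r + 3 - x.t from by omega]
                · by_cases h2 : ch = 'T'
                  · subst h2
                    rw [show sideB.get? 'T' = some ("RT", -1) from rfl]
                    dsimp only
                    rw [show (mkB x).get? "RT" = some (x.r - x.t) from rfl]
                    dsimp only
                    rw [show pureInc x (some 'T') 3 = {x with t := x.t + 3} from rfl]
                    apply PySem.Dict.ext
                    show [("RT", x.r - x.t + -1 * 3), ("CF", x.c - x.f), ("JM", x.j - x.m), ("AN", x.a - x.n)] = [("RT", x.r - (x.t + 3)), ("CF", x.c - x.f), ("JM", x.j - x.m), ("AN", x.a - x.n)]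
                    rw [show (x.r - x.t + -1 * 3 : Int) = x.r - (x.t + 3) from by omega]
                  · by_cases h3 : ch = 'C'
                    · subst h3
                      rw [show sideB.get? 'C' = some ("CF", 1) from rfl]
                      dsimp only
                      rw [show (mkB x).get? "CF" = some (x.c - x.f) from rfl]
                      dsimp only
                      rw [show pureInc x (some 'C') 3 = {x with c := x.c + 3} from rfl]
                      apply PySem.Dict.ext
                      show [("RT", x.r - x.t), ("CF", x.c - x.f + 1 * 3), ("JM", x.j - x.m), ("AN", x.a - x.n)] = [("RT", x.r - x.t), ("CF", x.c + 3 - x.f), ("JM", x.j - x.m), ("AN", x.a - x.n)]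
                      rw [show (x.c - x.f + 1 * 3 : Int) = x.c + 3 - x.f from by omega]
                    · by_cases h4 : ch = 'F'
                      · subst h4
                        rw [show sideB.get? 'F' = some ("CF", -1) from rfl]
                        dsimp only
                        rw [show (mkB x).get? "CF" = some (x.c - x.f) from rfl]
                        dsimp only
                        rw [show pureInc x (some 'F') 3 = {x with f := x.f + 3} from rfl]
                        apply PySem.Dict.ext
                        show [("RT", x.r - x.t), ("CF", x.c - x.f + -1 * 3), ("JM", x.j - x.m), ("AN", x.a - x.n)] = [("RT", x.r - x.t), ("CF", x.c - (x.f + 3)), ("JM", x.j - x.m), ("AN", x.a - x.n)]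
                        rw [show (x.c - x.f + -1 * 3 : Int) = x.c - (x.f + 3) from by omega]
                      · by_cases h5 : ch = 'J'
                        · subst h5
                          rw [show sideB.get? 'J' = some ("JM", 1) from rfl]
                          dsimp only
                          rw [show (mkB x).get? "JM" = some (x.j - x.m) from rfl]
                          dsimp only
                          rw [show pureInc x (some 'J') 3 = {x with j := x.j + 3} from rfl]
                          apply PySem.Dict.ext
                          show [("RT", x.r - x.t), ("CF", x.c - x.f), ("JM", x.j - x.m + 1 * 3), ("AN", x.a - x.n)] = [("RT", x.r - x.t), ("CF", x.c - x.f), ("JM", x.j + 3 - x.m), ("AN", x.a - x.n)]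
                          rw [show (x.j - x.m + 1 * 3 : Int) = x.j + 3 - x.m from by omega]
                        · by_cases h6 : ch = 'M'
                          · subst h6
                            rw [show sideB.get? 'M' = some ("JM", -1) from rfl]
                            dsimp only
                            rw [show (mkB x).get? "JM" = some (x.j - x.m) from rfl]
                            dsimp only
                            rw [show pureInc x (some 'M') 3 = {x with m := x.m + 3} from rfl]
                            apply PySem.Dict.ext
                            show [("RT", x.r - x.t), ("CF", x.c - x.f), ("JM", x.j - x.m + -1 * 3), ("AN", x.a - x.n)] = [("RT", x.r - x.t), ("CF", x.c - x.f), ("JM", x.j - (x.m + 3)), ("AN", x.a - x.n)]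
                            rw [show (x.j - x.m + -1 * 3 : Int) = x.j - (x.m + 3) from by omega]
                          · by_cases h7 : ch = 'A'
                            · subst h7
                              rw [show sideB.get? 'A' = some ("AN", 1) from rfl]
                              dsimp only
                              rw [show (mkB x).get? "AN" = some (x.a - x.n) from rfl]
                              dsimp only
                              rw [show pureInc x (some 'A') 3 = {x with a := x.a + 3} from rfl]
                              apply PySem.Dict.ext
                              show [("RT", x.r - x.t), ("CF", x.c - x.f), ("JM", x.j - x.m), ("AN", x.a - x.n + 1 * 3)] = [("RT", x.r - x.t), ("CF", x.c - x.f), ("JM", x.j - x.m), ("AN", x.a + 3 - x.n)]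
                              rw [show (x.a - x.n + 1 * 3 : Int) = x.a + 3 - x.n from by omega]
                            · by_cases h8 : ch = 'N'
                              · subst h8
                                rw [show sideB.get? 'N' = some ("AN", -1) from rfl]
                                dsimp only
                                rw [show (mkB x).get? "AN" = some (x.a - x.n) from rfl]
                                dsimp only
                                rw [show pureInc x (some 'N') 3 = {x with n := x.n + 3} from rfl]
                                apply PySem.Dict.ext
                                show [("RT", x.r - x.t), ("CF", x.c - x.f), ("JM", x.j - x.m), ("AN", x.a - x.n + -1 * 3)] = [("RT", x.r - x.t), ("CF", x.c - x.f), ("JM", x.j - x.m), ("AN", x.a - (x.n + 3))]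
                                rw [show (x.a - x.n + -1 * 3 : Int) = x.a - (x.n + 3) from by omega]
                              · have hg : sideB.get? ch = none := by
                                  rw [show sideB = PySem.Dict.mk [('R',(("RT":String),(1:Int))),('T',("RT",-1)),('C',("CF",1)),('F',("CF",-1)),('J',("JM",1)),('M',("JM",-1)),('A',("AN",1)),('N',("AN",-1))] from rfl]
                                  simp only [PySem.Dict.get?_mk_cons, beq_iff_eq]
                                  rw [if_neg (fun hh => h1 hh.symm), if_neg (fun hh => h2 hh.symm), if_neg (fun hh => h3 hh.symm), if_neg (fun hh => h4 hh.symm), if_neg (fun hh => h5 hh.symm), if_neg (fun hh => h6 hh.symm), if_neg (fun hh => h7 hh.symm), if_neg (fun hh => h8 hh.symm)]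
                                  rfl
                                rw [hg]
                                dsimp only
                                unfold pureInc
                                dsimp only
                                rw [if_neg h1, if_neg h2, if_neg h3, if_neg h4, if_neg h5, if_neg h6, if_neg h7, if_neg h8]
            · have hw : weightB.get? c = none := by
                rw [show weightB = PySem.Dict.mk [((1:Int),(3:Int)),(2,2),(3,1),(5,1),(6,2),(7,3)] from rfl]
                simp only [PySem.Dict.get?_mk_cons, beq_iff_eq]
                rw [if_neg (fun hh => hc1 hh.symm), if_neg (fun hh => hc2 hh.symm), if_neg (fun hh => hc3 hh.symm), if_neg (fun hh => hc5 hh.symm), if_neg (fun hh => hc6 hh.symm), if_neg (fun hh => hc7 hh.symm)]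
                rfl
              unfold stepB
              rw [hw]
              unfold pureStep
              rw [if_neg hc1, if_neg hc2, if_neg hc3, if_neg hc5, if_neg hc6, if_neg hc7]

theorem pyGetD_cons_succ {α : Type} (a : α) (xs : List α) (i : Int) (d : α) (h : 0 ≤ i) :
    PySem.List.pyGetD (a :: xs) (i + 1) d = PySem.List.pyGetD xs i d := by
  have hi : i = ((i.toNat : Nat) : Int) := (Int.toNat_of_nonneg h).symm
  rw [hi]
  have : ((i.toNat : Nat) : Int) + 1 = (((i.toNat + 1 : Nat)) : Int) := by push_cast; ring
  rw [this, PySem.List.pyGetD_natCast, PySem.List.pyGetD_natCast]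
  rfl

theorem pyRange_map_succ : ∀ (n : Nat),
    (PySem.List.pyRange 0 (n : Int) 1).map (· + 1) = PySem.List.pyRange 1 ((n : Int) + 1) 1 := by
  intro n; induction n with
  | zero => rfl
  | succ k ih =>
    have h1 : ((k + 1 : Nat) : Int) = (k : Int) + 1 := by push_cast; ring
    rw [h1, PySem.List.pyRange_one_succ_right (by positivity : (0:Int) ≤ (k : Int)),
      PySem.List.pyRange_one_succ_right (by omega : (1:Int) ≤ (k : Int) + 1)]
    simp [ih]

theorem loopA_eq : ∀ (sv : List String) (cs : List Int) (x : Tally),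
    (PySem.List.pyRange 0 (sv.length : Int) 1).foldl
      (fun d i => stepA d (PySem.List.pyGetD sv i "") (PySem.List.pyGetD cs i 0)) (mkD x)
      = mkD (pureLoop sv cs x) := by
  intro sv; induction sv with
  | nil => intro cs x; rfl
  | cons s sv ih =>
    intro cs x
    have hlen : ((s :: sv).length : Int) = (sv.length : Int) + 1 := by simp
    rw [hlen, PySem.List.pyRange_one_cons (by positivity)]
    simp only [List.foldl_cons, zero_add]
    rw [← pyRange_map_succ, List.foldl_map]
    have hbody : ∀ (d : PySem.Dict Char Int) (i : Int), i ∈ PySem.List.pyRange 0 (sv.length : Int) 1 →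
        stepA d (PySem.List.pyGetD (s :: sv) (i + 1) "") (PySem.List.pyGetD cs (i + 1) 0)
          = stepA d (PySem.List.pyGetD sv i "") (PySem.List.pyGetD cs.tail i 0) := by
      intro d i hi
      have h0 : 0 ≤ i := ((PySem.List.mem_pyRange_one).1 hi).1
      rw [pyGetD_cons_succ _ _ _ _ h0]
      cases cs with
      | nil =>
        have e1 : PySem.List.pyGetD ([] : List Int) (i + 1) 0 = 0 := by
          rw [show (i : Int) + 1 = ((i.toNat + 1 : Nat) : Int) by omega,
            PySem.List.pyGetD_natCast]; rfl
        have e2 : PySem.List.pyGetD (([] : List Int).tail) i 0 = 0 := by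
          rw [show (i : Int) = ((i.toNat : Nat) : Int) by omega, PySem.List.pyGetD_natCast]; rfl
        rw [e1, e2]
      | cons c cs' => rw [pyGetD_cons_succ _ _ _ _ h0]; rfl
    refine (PySem.List.foldl_congr_mem _ _
      (fun d i => stepA d (PySem.List.pyGetD sv i "") (PySem.List.pyGetD cs.tail i 0))
      _ hbody).trans ?_
    have h0s : PySem.List.pyGetD (s :: sv) 0 "" = s := by
      simp [PySem.List.pyGetD_zero_cons]
    cases cs with
    | nil =>
      rw [h0s]
      show _ = mkD (pureLoop sv [] (pureStep x s 0))
      have : PySem.List.pyGetD ([] : List Int) 0 0 = 0 := rfl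
      rw [this, stepA_mk, ih]
      simp [List.tail]
    | cons c cs' =>
      rw [h0s]
      show _ = mkD (pureLoop sv cs' (pureStep x s c))
      have : PySem.List.pyGetD (c :: cs') 0 0 = c := by simp [PySem.List.pyGetD_zero_cons]
      rw [this, stepA_mk, ih]
      simp [List.tail]

theorem loopB_eq : ∀ (sv : List String) (cs : List Int) (x : Tally),
    (sv.zip cs).foldl (fun b p => stepB b p.1 p.2) (mkB x) = mkB (pureLoop sv cs x) := by
  intro sv; induction sv with
  | nil => intro cs x; rfl
  | cons s sv ih =>
    intro cs x
    cases cs with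
    | nil => simp [pureLoop_nil, List.zip]
    | cons c cs' => simp only [List.zip_cons_cons, List.foldl_cons, stepB_mk, ih, pureLoop]

def pickA (v1 v2 : Int) (k1 k2 : Char) : Char :=
  if v2 < v1 then k1
  else if v1 < v2 then k2
  else PySem.List.pyGetD (PySem.List.sorted [k1, k2] (fun x => x) false) 0 ' '

theorem pick_eq (v1 v2 : Int) (k1 k2 : Char) (h : k1 < k2) :
    pickA v1 v2 k1 k2 = if 0 ≤ v1 - v2 then k1 else k2 := by
  have hs : PySem.List.sorted [k1, k2] (fun x => x) false = [k1, k2] :=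
    PySem.List.sorted_eq_self_of_pairwise [k1, k2] (fun x => x)
      (by simp only [List.pairwise_cons, List.mem_singleton, List.not_mem_nil,
            List.Pairwise.nil, and_true, forall_eq, IsEmpty.forall_iff, implies_true]
          exact h.le)
  unfold pickA
  rw [hs]
  split_ifs <;> first | rfl | omega

theorem finalEq (x : Tally) :
    resultLoop (mkD x) = PySem.Str.join "" (axesB.map (fun axis =>
      if 0 ≤ (mkB x).getD axis 0 then String.mk [(PySem.Str.pyGet? axis 0).getD ' ']
      else String.mk [(PySem.Str.pyGet? axis 1).getD ' '])) := by
  have hL : resultLoop (mkD x) =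
      String.mk [pickA x.r x.t 'R' 'T', pickA x.c x.f 'C' 'F',
                 pickA x.j x.m 'J' 'M', pickA x.a x.n 'A' 'N'] := by
    unfold resultLoop
    rw [show ((mkD x).size : Int) = 8 from rfl,
        show PySem.List.pyRange 0 (8:Int) 2 = [0,2,4,6] from by decide]
    simp only [List.foldl_cons, List.foldl_nil]
    rfl
  have g1 : (mkB x).getD "RT" 0 = x.r - x.t := rfl
  have g2 : (mkB x).getD "CF" 0 = x.c - x.f := rfl
  have g3 : (mkB x).getD "JM" 0 = x.j - x.m := rfl
  have g4 : (mkB x).getD "AN" 0 = x.a - x.n := rfl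
  rw [hL, pick_eq _ _ _ _ (by decide), pick_eq _ _ _ _ (by decide),
      pick_eq _ _ _ _ (by decide), pick_eq _ _ _ _ (by decide)]
  simp only [axesB, List.map_cons, List.map_nil, g1, g2, g3, g4]
  by_cases h1 : 0 ≤ x.r - x.t <;> by_cases h2 : 0 ≤ x.c - x.f <;>
    by_cases h3 : 0 ≤ x.j - x.m <;> by_cases h4 : 0 ≤ x.a - x.n <;>
    simp only [h1, h2, h3, h4, if_pos, if_false] <;> rfl

theorem initA_eq :
    (PySem.Dict.ofList [('R',(0:Int)),('T',0),('C',0),('F',0),('J',0),('M',0),('A',0),('N',0)])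
      = mkD ⟨0,0,0,0,0,0,0,0⟩ := by decide

theorem initB_eq :
    axesB.foldl (fun d axis => d.insert axis (0:Int)) PySem.Dict.empty = mkB ⟨0,0,0,0,0,0,0,0⟩ := by
  decide

theorem solution_spec : Claim_equal_solution := by
  intro survey choices _hdom _hpre
  unfold Spec_solution
  show solution survey choices = solution_alt survey choices
  simp only [solution, solution_alt]
  rw [initA_eq, initB_eq, loopA_eq, loopB_eq, finalEq]
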